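-- pv_equiv track=rewrite | github.com/yuping3252/CodeDataSearchEngine | trg/sql_blocks/tracedecom_selcols.py | trace_sel_cols_
-- ===== SOURCE A (Python) =====
-- def trace_sel_cols_(query_nested, traced_cols_):
--     trace_lists = []
--     for qnlist in query_nested:
--         trace_list = []
--         for qn in qnlist:
--             trace_qn = []
--             for col in traced_cols_:
--                 if qn[0] == col[0]:
--                     trace_qn.append(col)
--             trace_list.append(trace_qn)
--         trace_lists.append(trace_list)
--
--     traced_sel_cols = []
--     for trace_list in trace_lists:
--         trace_list.reverse()
--         cols = []
--         for cols_ in trace_list: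
--             if cols_ != []:
--                 cols = cols_
--                 break
--         if cols:
--             for c in cols:
--                 if traced_sel_cols.count(c) == 0:
--                     traced_sel_cols.append(c)
--     return traced_sel_cols
-- ===== SOURCE B (Python) =====
-- def trace_sel_cols_(query_nested, traced_cols_):
--     # Index traced columns once by first field; per qnlist keep only the last
--     # key present in the index, and flush each key's group at most once
--     # (a 'done' set), deduping into an insertion-ordered dict.
--     index = {}
--     for col in traced_cols_:
--         index.setdefault(col[0], []).append(col)
--     result = {}
--     done = set()
--     for qnlist in query_nested:
--         key = None
--         for qn in qnlist:
--             k = qn[0]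
--             if k in index:
--                 key = k
--         if key is not None and key not in done:
--             done.add(key)
--             for c in index[key]:
--                 result.setdefault(tuple(c), c)
--     return list(result.values())
-- ===== Notes on version B (the rewrite author's own statement) =====
-- stated objective: faster
-- what changed: B builds a hash index of traced_cols_ grouped by first field once (so the per-qn inner scan over traced_cols_ disappears), per qnlist only tracks the last qn key present in the index, flushes each key's group into the result at most once via a done-set, and dedups with an insertion-ordered dict instead of list.count.
-- outside the precondition, e.g. on trace_sel_cols_([[[]]], []): A returns [], B raises IndexError; on trace_sel_cols_([], [[]]): A returns [], B raises IndexError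
import Mathlib
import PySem

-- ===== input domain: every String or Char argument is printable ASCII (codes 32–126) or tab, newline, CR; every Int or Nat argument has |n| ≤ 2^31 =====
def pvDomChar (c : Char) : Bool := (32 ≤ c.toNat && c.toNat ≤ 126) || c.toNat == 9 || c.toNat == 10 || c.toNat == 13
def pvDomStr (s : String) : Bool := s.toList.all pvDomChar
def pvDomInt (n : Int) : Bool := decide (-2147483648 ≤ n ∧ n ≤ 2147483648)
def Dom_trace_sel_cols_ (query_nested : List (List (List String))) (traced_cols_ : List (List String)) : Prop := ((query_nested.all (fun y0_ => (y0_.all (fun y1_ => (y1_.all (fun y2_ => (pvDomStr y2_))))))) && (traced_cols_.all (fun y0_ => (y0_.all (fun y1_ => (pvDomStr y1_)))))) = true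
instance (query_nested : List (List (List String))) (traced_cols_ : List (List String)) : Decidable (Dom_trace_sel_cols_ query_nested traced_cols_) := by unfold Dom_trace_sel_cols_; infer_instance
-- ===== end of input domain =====

-- B replaces A's per-qn scans of traced_cols_ by one hash index built up front, flushes each
-- index group at most once via a done-set, and dedups via an insertion-ordered dict; on Pre_.

-- ===== PORT A =====
-- helper for A's 'for cols_ in trace_list: if cols_ != []: cols = cols_; break' (cols starts as [])
def pvFirstNE (l : List (List (List String))) : List (List String) :=
  match l with
  | [] => []
  | c :: rest => if c ≠ [] then c else pvFirstNE rest

def trace_sel_cols_ (query_nested : List (List (List String))) (traced_cols_ : List (List String)) : List (List String) :=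
  let trace_lists := query_nested.foldl (fun tls qnlist =>
    tls ++ [qnlist.foldl (fun tl qn =>
      tl ++ [traced_cols_.foldl (fun tq col =>
        if PySem.List.pyGet? qn 0 == PySem.List.pyGet? col 0 then tq ++ [col] else tq) []]) []]) []
  trace_lists.foldl (fun tsc trace_list =>
    let cols := pvFirstNE trace_list.reverse
    if cols ≠ [] then
      cols.foldl (fun t c => if PySem.List.count t c == 0 then t ++ [c] else t) tsc
    else tsc) []

-- ===== PORT B =====
-- index.setdefault(col[0], []).append(col)  =  modify (col[0]) [] (· ++ [col]);
-- the dict key is col[0] ported as 'PySem.List.pyGet? col 0' (Option String; none is the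
-- IndexError case, excluded by Pre_), so key equality is Python's string equality on Pre_;
-- 'key = None / key = k' is the state (none / some k); index[key] (key known present) is getD.
def trace_sel_cols__alt (query_nested : List (List (List String))) (traced_cols_ : List (List String)) : List (List String) :=
  let index : PySem.Dict (Option String) (List (List String)) :=
    traced_cols_.foldl (fun d col =>
      PySem.Dict.modify d (PySem.List.pyGet? col 0) [] (fun v => v ++ [col])) PySem.Dict.empty
  (query_nested.foldl (fun (st : PySem.Dict (List String) (List String) × PySem.Set (Option String)) qnlist =>
      let key := qnlist.foldl (fun key qn =>
        if PySem.Dict.contains index (PySem.List.pyGet? qn 0) then some (PySem.List.pyGet? qn 0) else key)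
        (none : Option (Option String))
      match key with
      | none => st
      | some k =>
          if PySem.Set.contains st.2 k then st
          else ((PySem.Dict.getD index k []).foldl (fun r c => PySem.Dict.setdefault r c c) st.1,
                PySem.Set.add st.2 k))
    (PySem.Dict.empty, PySem.Set.empty)).1.values

-- ===== PRECONDITION & SPEC =====
-- Pre_ excludes inputs containing an empty qn or an empty col: on those B's unconditional
-- index build / key lookup raises IndexError (and A raises too except when the inner loop that
-- would subscript them happens never to run because the other argument is empty).
def Pre_trace_sel_cols_ (query_nested : List (List (List String))) (traced_cols_ : List (List String)) : Prop :=
  (∀ qnlist ∈ query_nested, ∀ qn ∈ qnlist, qn ≠ []) ∧ (∀ col ∈ traced_cols_, col ≠ [])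
instance (query_nested : List (List (List String))) (traced_cols_ : List (List String)) : Decidable (Pre_trace_sel_cols_ query_nested traced_cols_) := by unfold Pre_trace_sel_cols_; infer_instance
def pvWitness_trace_sel_cols_ : List (List (List String)) × List (List String) :=
  ([[["a"], ["b"]], [["c"]]], [["a", "x"], ["b", "y"], ["a", "z"]])
def Spec_trace_sel_cols_ (query_nested : List (List (List String))) (traced_cols_ : List (List String)) (out : List (List String)) : Prop := out = trace_sel_cols__alt query_nested traced_cols_
instance (query_nested : List (List (List String))) (traced_cols_ : List (List String)) (out : List (List String)) : Decidable (Spec_trace_sel_cols_ query_nested traced_cols_ out) := by unfold Spec_trace_sel_cols_; infer_instance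

-- ===== CLAIM =====
def Claim_equal_trace_sel_cols_ : Prop := ∀ (query_nested : List (List (List String))) (traced_cols_ : List (List String)), Dom_trace_sel_cols_ query_nested traced_cols_ → Pre_trace_sel_cols_ query_nested traced_cols_ → Spec_trace_sel_cols_ query_nested traced_cols_ (trace_sel_cols_ query_nested traced_cols_)

-- ===== LEMMAS AND PROOFS =====

-- the match group of key k (A filters it per qn; B stores it once in the index)
def pvF (traced_cols_ : List (List String)) (k : Option String) : List (List String) :=
  traced_cols_.filter (fun col => PySem.List.pyGet? col 0 == k)

theorem index_get? (traced_cols_ : List (List String)) (k : Option String) :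
    PySem.Dict.get? (traced_cols_.foldl (fun d col =>
        PySem.Dict.modify d (PySem.List.pyGet? col 0) [] (fun v => v ++ [col])) PySem.Dict.empty) k
      = (if pvF traced_cols_ k ≠ [] then some (pvF traced_cols_ k) else none) := by
  unfold pvF
  rw [← List.foldl_map (f := fun col => (PySem.List.pyGet? col 0, col))
        (g := fun d p => PySem.Dict.modify d p.1 [] (fun v => v ++ [p.2]))]
  set F := (traced_cols_.map (fun col => (PySem.List.pyGet? col 0, col))).foldl
      (fun d p => PySem.Dict.modify d p.1 [] (fun v => v ++ [p.2])) PySem.Dict.empty with hF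
  have hgetD : F.getD k [] = traced_cols_.filter (fun col => PySem.List.pyGet? col 0 == k) := by
    rw [hF, PySem.Dict.getD_foldl_modify_append]
    simp [List.filter_map, Function.comp_def]
  have hkeys : (k ∈ F.keys) ↔ k ∈ traced_cols_.map (fun col => PySem.List.pyGet? col 0) := by
    rw [hF, PySem.Dict.keys_foldl_modify_key]
    simp [PySem.Dict.keys_empty, PySem.Set.update_nil_left, PySem.Set.mem_ofList]
  by_cases hne : traced_cols_.filter (fun col => PySem.List.pyGet? col 0 == k) = []
  · simp only [hne, ne_eq, not_true_eq_false, if_false]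
    rw [PySem.Dict.get?_eq_none_iff_not_mem_keys, hkeys]
    simp only [List.filter_eq_nil_iff] at hne
    simp only [List.mem_map, not_exists, not_and]
    intro col hc hk
    exact hne col hc (by simp [hk])
  · simp only [hne, ne_eq, not_false_iff, if_true]
    cases hget : F.get? k with
    | none =>
        rw [PySem.Dict.get?_eq_none_iff_not_mem_keys, hkeys] at hget
        exfalso
        rcases List.ne_nil_iff_exists_cons.mp hne with ⟨c, cs, hfe⟩
        have hc : c ∈ traced_cols_.filter (fun col => PySem.List.pyGet? col 0 == k) := by simp [hfe]
        rw [List.mem_filter] at hc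
        exact hget (List.mem_map.mpr ⟨c, hc.1, by simpa using hc.2⟩)
    | some v =>
        have h2 := PySem.Dict.getD_eq_get?_getD (d := F) (k := k) (d0 := ([] : List (List String)))
        rw [hget] at h2
        rw [← hgetD, h2]
        rfl

theorem index_contains (traced_cols_ : List (List String)) (k : Option String) :
    PySem.Dict.contains (traced_cols_.foldl (fun d col =>
        PySem.Dict.modify d (PySem.List.pyGet? col 0) [] (fun v => v ++ [col])) PySem.Dict.empty) k
      = decide (pvF traced_cols_ k ≠ []) := by
  rw [PySem.Dict.contains_eq_isSome_get?, index_get?]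
  by_cases h : pvF traced_cols_ k = [] <;> simp [h]

theorem index_getD (traced_cols_ : List (List String)) (k : Option String) :
    PySem.Dict.getD (traced_cols_.foldl (fun d col =>
        PySem.Dict.modify d (PySem.List.pyGet? col 0) [] (fun v => v ++ [col])) PySem.Dict.empty) k []
      = pvF traced_cols_ k := by
  rw [PySem.Dict.getD_eq_get?_getD, index_get?]
  by_cases h : pvF traced_cols_ k = [] <;> simp [h]

-- A's reverse-then-first-nonempty equals a forward keep-last-nonempty fold.
def pvFirstNE' (l : List (List (List String))) (d : List (List String)) : List (List String) :=
  match l with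
  | [] => d
  | c :: rest => if c ≠ [] then c else pvFirstNE' rest d

theorem pvFirstNE'_nil_default (l : List (List (List String))) :
    pvFirstNE' l [] = pvFirstNE l := by
  induction l with
  | nil => rfl
  | cons c rest ih => simp [pvFirstNE', pvFirstNE, ih]

theorem pvFirstNE'_append (ys : List (List (List String))) (x : List (List String)) (d : List (List String)) :
    pvFirstNE' (ys ++ [x]) d = pvFirstNE' ys (if x ≠ [] then x else d) := by
  induction ys with
  | nil => rfl
  | cons c rest ih => simp only [List.cons_append, pvFirstNE', ih]

theorem lastNE_fold (m : List String → List (List String)) (l : List (List String)) (acc : List (List String)) :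
    l.foldl (fun lc qn => if m qn ≠ [] then m qn else lc) acc
      = pvFirstNE' ((l.map m).reverse) acc := by
  induction l generalizing acc with
  | nil => rfl
  | cons x rest ih =>
      simp only [List.foldl_cons, List.map_cons, List.reverse_cons, ih, pvFirstNE'_append]

-- drop A's 'if cols:' guard: folding an empty cols is already a no-op
theorem if_ne_nil_foldl (cols : List (List String)) (f : List (List String) → List String → List (List String)) (tsc : List (List String)) :
    (if cols ≠ [] then cols.foldl f tsc else tsc) = cols.foldl f tsc := by
  cases cols <;> simp

-- A in canonical form: one fold over query_nested; the group is the forward keep-last fold of pvF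
theorem a_canonical (query_nested : List (List (List String))) (traced_cols_ : List (List String)) :
    trace_sel_cols_ query_nested traced_cols_
      = query_nested.foldl (fun tsc qnlist =>
          (qnlist.foldl (fun g qn =>
              if pvF traced_cols_ (PySem.List.pyGet? qn 0) ≠ [] then pvF traced_cols_ (PySem.List.pyGet? qn 0) else g) []).foldl
            (fun t c => if PySem.List.count t c == 0 then t ++ [c] else t) tsc) [] := by
  unfold trace_sel_cols_
  simp only [PySem.List.foldl_append_if_eq_filter, PySem.List.foldl_append_singleton_eq_map,
    List.nil_append, List.foldl_map, if_ne_nil_foldl]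
  have hswap : ∀ qn : List String,
      (traced_cols_.filter (fun col => PySem.List.pyGet? qn 0 == PySem.List.pyGet? col 0))
        = pvF traced_cols_ (PySem.List.pyGet? qn 0) := by
    intro qn
    unfold pvF
    apply List.filter_congr
    intro col _
    simp [eq_comm]
  simp only [hswap, lastNE_fold, pvFirstNE'_nil_default]

-- B's last-present-key fold tracks A's keep-last-nonempty group fold
theorem key_group (traced_cols_ : List (List String)) (index : PySem.Dict (Option String) (List (List String)))
    (hC : ∀ k, index.contains k = decide (pvF traced_cols_ k ≠ []))
    (qnlist : List (List String)) (key0 : Option (Option String)) (g0 : List (List String))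
    (h0 : g0 = (match key0 with | some k => pvF traced_cols_ k | none => [])) :
    qnlist.foldl (fun g qn =>
        if pvF traced_cols_ (PySem.List.pyGet? qn 0) ≠ [] then pvF traced_cols_ (PySem.List.pyGet? qn 0) else g) g0
      = (match qnlist.foldl (fun key qn =>
            if index.contains (PySem.List.pyGet? qn 0) then some (PySem.List.pyGet? qn 0) else key) key0 with
         | some k => pvF traced_cols_ k
         | none => []) := by
  induction qnlist generalizing key0 g0 with
  | nil => simpa using h0
  | cons qn rest ih =>
      simp only [List.foldl_cons]
      by_cases h : pvF traced_cols_ (PySem.List.pyGet? qn 0) ≠ []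
      · rw [if_pos h]
        have hh : (if index.contains (PySem.List.pyGet? qn 0) = true
            then some (PySem.List.pyGet? qn 0) else key0) = some (PySem.List.pyGet? qn 0) := by
          rw [hC]; simp [h]
        rw [hh]
        exact ih (some (PySem.List.pyGet? qn 0)) _ rfl
      · rw [if_neg h]
        have hh : (if index.contains (PySem.List.pyGet? qn 0) = true
            then some (PySem.List.pyGet? qn 0) else key0) = key0 := by
          rw [hC]; simp [h]
        rw [hh]
        exact ih key0 g0 h0

-- membership through A's count-dedup flush
theorem mem_flush (cols out : List (List String)) (x : List String) :
    x ∈ cols.foldl (fun t c => if PySem.List.count t c == 0 then t ++ [c] else t) out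
      ↔ x ∈ out ∨ x ∈ cols := by
  induction cols generalizing out with
  | nil => simp
  | cons c rest ih =>
      simp only [List.foldl_cons]
      by_cases hc : c ∈ out
      · have h2 : (PySem.List.count out c == 0) = false := by
          simp [PySem.List.count_eq, List.count_eq_zero, hc]
        rw [h2]
        simp only [Bool.false_eq_true, if_false, ih, List.mem_cons]
        constructor
        · rintro (h | h)
          · exact Or.inl h
          · exact Or.inr (Or.inr h)
        · rintro (h | h | h)
          · exact Or.inl h
          · exact Or.inl (h ▸ hc)
          · exact Or.inr h
      · have h2 : (PySem.List.count out c == 0) = true := by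
          simp [PySem.List.count_eq, List.count_eq_zero, hc]
        rw [h2]
        simp only [if_true, ih, List.mem_append, List.mem_cons]
        tauto

-- flushing a group whose columns are all present already is a no-op
theorem flush_noop (cols out : List (List String)) (h : ∀ c ∈ cols, c ∈ out) :
    cols.foldl (fun t c => if PySem.List.count t c == 0 then t ++ [c] else t) out = out := by
  induction cols with
  | nil => rfl
  | cons c rest ih =>
      have h2 : (PySem.List.count out c == 0) = false := by
        simp [PySem.List.count_eq, List.count_eq_zero, h c (by simp)]
      simp only [List.foldl_cons, h2, Bool.false_eq_true, if_false]
      exact ih (fun c hc => h c (by simp [hc]))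

-- dedup via the result dict = A's count-dedup, under the items invariant
theorem dedup_dict (cols out : List (List String)) (r : PySem.Dict (List String) (List String))
    (h : r.items = out.map (fun c => (c, c))) :
    (cols.foldl (fun r c => PySem.Dict.setdefault r c c) r).items
      = (cols.foldl (fun t c => if PySem.List.count t c == 0 then t ++ [c] else t) out).map (fun c => (c, c)) := by
  induction cols generalizing out r with
  | nil => simpa using h
  | cons c rest ih =>
      have hkeys : r.keys = out := by
        simp only [PySem.Dict.keys, h, List.map_map]
        simp [Function.comp_def]
      have hcon : r.contains c = decide (c ∈ out) := by
        rw [PySem.Dict.contains_eq_decide_mem_keys, hkeys]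
      by_cases hc : c ∈ out
      · have h1 : r.setdefault c c = r := by
          apply PySem.Dict.setdefault_of_contains; simp [hcon, hc]
        have h2 : (PySem.List.count out c == 0) = false := by
          simp [PySem.List.count_eq, List.count_eq_zero, hc]
        simp only [List.foldl_cons, h1, h2, Bool.false_eq_true, if_false]
        exact ih out r h
      · have hcf : r.contains c = false := by simp [hcon, hc]
        have h1 : r.setdefault c c = r.insert c c := by
          apply PySem.Dict.setdefault_of_not_contains; exact hcf
        have h2 : (PySem.List.count out c == 0) = true := by
          simp [PySem.List.count_eq, List.count_eq_zero, hc]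
        simp only [List.foldl_cons, h1, h2, if_true]
        refine ih (out ++ [c]) (r.insert c c) ?_
        rw [PySem.Dict.items_insert_of_not_contains _ _ hcf, h]
        simp

-- the outer fold: B's (dict, done-set) state vs A's output list
theorem outer_done (traced_cols_ : List (List String)) (index : PySem.Dict (Option String) (List (List String)))
    (hG : ∀ k, index.getD k [] = pvF traced_cols_ k)
    (L : List (List (List String))) (out : List (List String))
    (r : PySem.Dict (List String) (List String)) (done : PySem.Set (Option String))
    (h1 : r.items = out.map (fun c => (c, c)))
    (h2 : ∀ k, PySem.Set.contains done k = true → ∀ c ∈ pvF traced_cols_ k, c ∈ out) :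
    (L.foldl (fun (st : PySem.Dict (List String) (List String) × PySem.Set (Option String)) qnlist =>
        match qnlist.foldl (fun key qn =>
            if index.contains (PySem.List.pyGet? qn 0) then some (PySem.List.pyGet? qn 0) else key)
            (none : Option (Option String)) with
        | none => st
        | some k =>
            if PySem.Set.contains st.2 k then st
            else ((PySem.Dict.getD index k []).foldl (fun r c => PySem.Dict.setdefault r c c) st.1,
                  PySem.Set.add st.2 k)) (r, done)).1.items
      = (L.foldl (fun tsc qnlist =>
          (match qnlist.foldl (fun key qn =>
              if index.contains (PySem.List.pyGet? qn 0) then some (PySem.List.pyGet? qn 0) else key)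
              (none : Option (Option String)) with
           | some k => pvF traced_cols_ k
           | none => []).foldl
            (fun t c => if PySem.List.count t c == 0 then t ++ [c] else t) tsc) out).map (fun c => (c, c)) := by
  induction L generalizing out r done with
  | nil => simpa using h1
  | cons qnlist rest ih =>
      simp only [List.foldl_cons]
      cases hK : qnlist.foldl (fun key qn =>
          if index.contains (PySem.List.pyGet? qn 0) then some (PySem.List.pyGet? qn 0) else key)
          (none : Option (Option String)) with
      | none =>
          dsimp only
          exact ih out r done h1 h2
      | some k =>
          dsimp only
          by_cases hd : PySem.Set.contains done k = true
          · rw [if_pos hd, flush_noop (pvF traced_cols_ k) out (h2 k hd)]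
            exact ih out r done h1 h2
          · rw [if_neg hd, hG k]
            refine ih _ _ _ (dedup_dict (pvF traced_cols_ k) out r h1) ?_
            intro k' hk' c hcF
            have hk'mem : k' ∈ PySem.Set.add done k := by simpa [PySem.Set.contains] using hk'
            rcases (PySem.Set.mem_add done k k').mp hk'mem with hin | heq
            · exact (mem_flush _ _ _).mpr (Or.inl (h2 k' (by simpa [PySem.Set.contains] using hin) c hcF))
            · subst heq
              exact (mem_flush _ _ _).mpr (Or.inr hcF)

theorem trace_sel_cols__spec : Claim_equal_trace_sel_cols_ := by
  intro query_nested traced_cols_ _ _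
  unfold Spec_trace_sel_cols_
  rw [a_canonical]
  unfold trace_sel_cols__alt
  have hstepA : ∀ (tsc : List (List String)) (qnlist : List (List String)),
      (qnlist.foldl (fun g qn =>
          if pvF traced_cols_ (PySem.List.pyGet? qn 0) ≠ [] then pvF traced_cols_ (PySem.List.pyGet? qn 0) else g) []).foldl
        (fun t c => if PySem.List.count t c == 0 then t ++ [c] else t) tsc
      = (match qnlist.foldl (fun key qn =>
            if PySem.Dict.contains (traced_cols_.foldl (fun d col =>
                PySem.Dict.modify d (PySem.List.pyGet? col 0) [] (fun v => v ++ [col])) PySem.Dict.empty)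
              (PySem.List.pyGet? qn 0) then some (PySem.List.pyGet? qn 0) else key)
            (none : Option (Option String)) with
         | some k => pvF traced_cols_ k
         | none => []).foldl
          (fun t c => if PySem.List.count t c == 0 then t ++ [c] else t) tsc := by
    intro tsc qnlist
    rw [key_group traced_cols_ _ (fun k => index_contains traced_cols_ k) qnlist none [] rfl]
  simp only [hstepA]
  have h := outer_done traced_cols_ _ (fun k => index_getD traced_cols_ k) query_nested []
        PySem.Dict.empty PySem.Set.empty rfl (by intro k hk; simp [PySem.Set.contains, PySem.Set.empty] at hk)
  simp only [PySem.Dict.values, h, List.map_map]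
  simp [Function.comp_def]
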